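-- pv_equiv track=rewrite | github.com/tmabraham/med-lm-envs | medarc_verifiers/orchestrate/resources.py | _select_contiguous
-- ===== SOURCE A (Python) =====
-- from typing import Iterable, Sequence
--
-- def _select_contiguous(indices: Sequence[int], count: int) -> list[int] | None:
--     if count <= 1:
--         return list(indices[:count])
--     sorted_indices = sorted(indices)
--     start = 0
--     for end in range(len(sorted_indices)):
--         if end > start and sorted_indices[end] != sorted_indices[end - 1] + 1:
--             start = end
--         if end - start + 1 == count:
--             return sorted_indices[start : end + 1]
--     return None
-- ===== SOURCE B (Python) =====
-- def _select_contiguous(indices, count):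
--     if count <= 1:
--         return list(indices[:count])
--     # split the sorted values into maximal consecutive runs, then scan the runs
--     runs = []
--     cur = []
--     for x in sorted(indices):
--         if cur and x == cur[-1] + 1:
--             cur.append(x)
--         else:
--             if cur:
--                 runs.append(cur)
--             cur = [x]
--     if cur:
--         runs.append(cur)
--     for run in runs:
--         if len(run) >= count:
--             return run[:count]
--     return None
-- ===== Notes on version B (the rewrite author's own statement) =====
-- stated objective: alternative
-- what changed: B first splits the sorted values into explicit maximal consecutive runs and then scans the run list for the first run of length >= count, instead of A's inline start/end window over indices.
import Mathlib
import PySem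

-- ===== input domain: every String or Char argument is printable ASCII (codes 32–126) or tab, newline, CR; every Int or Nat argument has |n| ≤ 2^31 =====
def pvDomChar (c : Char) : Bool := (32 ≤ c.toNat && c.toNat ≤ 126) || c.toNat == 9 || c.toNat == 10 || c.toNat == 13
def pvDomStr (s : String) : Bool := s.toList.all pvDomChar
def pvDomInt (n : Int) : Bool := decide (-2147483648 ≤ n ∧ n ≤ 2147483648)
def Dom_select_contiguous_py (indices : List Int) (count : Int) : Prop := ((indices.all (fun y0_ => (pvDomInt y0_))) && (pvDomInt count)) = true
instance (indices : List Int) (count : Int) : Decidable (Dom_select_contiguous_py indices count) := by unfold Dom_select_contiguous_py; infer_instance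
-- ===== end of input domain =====

-- B splits the sorted values into explicit maximal consecutive runs and scans them,
-- instead of A's inline start/end window; same cost, alternative decomposition.

-- ===== PORT A =====
-- the 'for end in range(len(sorted_indices))' loop with mutable 'start'
def aLoop (s : List Int) (count : Int) (start e : Nat) : Option (List Int) :=
  if h : e < s.length then
    let start' := if e > start ∧ s.getD e 0 ≠ s.getD (e - 1) 0 + 1 then e else start
    if (e : Int) - (start' : Int) + 1 = count then
      some (PySem.List.slice s (some (start' : Int)) (some ((e : Int) + 1)))
    else aLoop s count start' (e + 1)
  else none
termination_by s.length - e

def select_contiguous_py (indices : List Int) (count : Int) : Option (List Int) :=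
  if count ≤ 1 then some (PySem.List.slice indices none (some count))
  else aLoop (PySem.List.sorted indices (fun x => x) false) count 0 0

-- ===== PORT B =====
-- the run-building loop: state (runs, cur); returns the final (runs, cur)
def splitRuns (runs : List (List Int)) (cur : List Int) : List Int → List (List Int) × List Int
  | [] => (runs, cur)
  | x :: rest =>
    if cur ≠ [] ∧ x = cur.getLastD 0 + 1 then splitRuns runs (cur ++ [x]) rest
    else if cur ≠ [] then splitRuns (runs ++ [cur]) [x] rest
    else splitRuns runs [x] rest

-- the 'for run in runs' scan
def scanRuns (runs : List (List Int)) (count : Int) : Option (List Int) :=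
  match runs with
  | [] => none
  | r :: rest =>
    if count ≤ (r.length : Int) then some (PySem.List.slice r none (some count))
    else scanRuns rest count

def select_contiguous_py_alt (indices : List Int) (count : Int) : Option (List Int) :=
  if count ≤ 1 then some (PySem.List.slice indices none (some count))
  else
    let p := splitRuns [] [] (PySem.List.sorted indices (fun x => x) false)
    let runs := if p.2 ≠ [] then p.1 ++ [p.2] else p.1
    scanRuns runs count

-- ===== PRECONDITION & SPEC =====
def Spec_select_contiguous_py (indices : List Int) (count : Int) (out : Option (List Int)) : Prop := out = select_contiguous_py_alt indices count
instance (indices : List Int) (count : Int) (out : Option (List Int)) : Decidable (Spec_select_contiguous_py indices count out) := by unfold Spec_select_contiguous_py; infer_instance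

-- ===== CLAIM (what is proved, stated in full; the proofs are below) =====
def Claim_equal_select_contiguous_py : Prop := ∀ (indices : List Int) (count : Int), Dom_select_contiguous_py indices count → Spec_select_contiguous_py indices count (select_contiguous_py indices count)

-- ===== LEMMAS AND PROOFS =====

-- intermediate form: A's window loop carried as an explicit current run
def go (count : Int) (cur : List Int) : List Int → Option (List Int)
  | [] => none
  | x :: rest =>
    let cur' := if cur ≠ [] ∧ x = cur.getLastD 0 + 1 then cur ++ [x] else [x]
    if (cur'.length : Int) = count then some cur' else go count cur' rest

def finishRuns (p : List (List Int) × List Int) : List (List Int) :=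
  if p.2 ≠ [] then p.1 ++ [p.2] else p.1

lemma finishRuns_cons (a : List Int) (rs : List (List Int)) (c : List Int) :
    finishRuns (a :: rs, c) = a :: finishRuns (rs, c) := by
  simp only [finishRuns]; split_ifs <;> simp

lemma finishRuns_cons' (a : List Int) (rs : List (List Int)) (c : List Int) :
    finishRuns ([a] ++ rs, c) = a :: finishRuns (rs, c) := finishRuns_cons a rs c

lemma window_length (s : List Int) (start e : Nat) (h2 : e ≤ s.length) :
    ((s.drop start).take (e - start)).length = e - start := by
  simp [List.length_take, List.length_drop]; omega

lemma window_ne_nil (s : List Int) (start e : Nat) (h1 : start < e) (h2 : e ≤ s.length) :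
    ((s.drop start).take (e - start)) ≠ [] := by
  have := window_length s start e h2
  intro h; rw [h] at this; simp at this; omega

lemma window_getLastD (s : List Int) (start e : Nat) (h1 : start < e) (h2 : e ≤ s.length) :
    ((s.drop start).take (e - start)).getLastD 0 = s.getD (e - 1) 0 := by
  have hl := window_length s start e h2
  rw [List.getLastD_eq_getLast?, List.getLast?_eq_getElem?, List.getD_eq_getElem?_getD, hl]
  rw [List.getElem?_take, List.getElem?_drop]
  rw [if_pos (show e - start - 1 < e - start by omega)]
  rw [show start + (e - start - 1) = e - 1 by omega]

lemma window_extend (s : List Int) (start e : Nat) (h1 : start ≤ e) (h2 : e < s.length) :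
    (s.drop start).take (e - start) ++ [s.getD e 0] = (s.drop start).take (e + 1 - start) := by
  rw [show e + 1 - start = (e - start) + 1 by omega, List.take_add_one]
  congr 1
  rw [List.getElem?_drop, List.getD_eq_getElem?_getD, show start + (e - start) = e by omega,
    List.getElem?_eq_getElem h2]
  rfl

lemma aLoop_eq_go (s : List Int) (count : Int) :
    ∀ n start e, start ≤ e → e ≤ s.length → n = s.length - e →
    aLoop s count start e = go count ((s.drop start).take (e - start)) (s.drop e) := by
  intro n
  induction n with
  | zero =>
    intro start e h1 h2 hn
    have he : e = s.length := by omega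
    rw [aLoop]
    simp [he, go, List.drop_length]
  | succ n ih =>
    intro start e h1 h2 hn
    have he : e < s.length := by omega
    have hdrop : s.drop e = s.getD e 0 :: s.drop (e + 1) := by
      rw [List.drop_eq_getElem_cons he, List.getD_eq_getElem _ _ he]
    rw [aLoop, dif_pos he, hdrop]
    simp only [go]
    by_cases hse : start = e
    · -- empty window: A keeps start (= e), go starts the run [x]
      subst hse
      have hA : ¬ (start > start ∧ s.getD start 0 ≠ s.getD (start - 1) 0 + 1) :=
        fun h => absurd h.1 (lt_irrefl start)
      have hG : ¬ (((s.drop start).take (start - start)) ≠ [] ∧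
          s.getD start 0 = ((s.drop start).take (start - start)).getLastD 0 + 1) := by simp
      rw [if_neg hA, if_neg hG]
      have hcur' : [s.getD start 0] = (s.drop start).take (start + 1 - start) := by
        have h := window_extend s start start (Nat.le_refl _) he
        simpa using h
      by_cases hret : (start : Int) - (start : Int) + 1 = count
      · rw [if_pos hret,
          if_pos (show (([s.getD start 0]).length : Int) = count by simpa using hret)]
        rw [show ((start : Int)) + 1 = (((start + 1 : Nat) : Int)) by push_cast; ring,
          PySem.List.slice_natCast, ← hcur']
      · rw [if_neg hret,
          if_neg (show ¬ (([s.getD start 0]).length : Int) = count by simpa using hret)]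
        rw [ih start (start + 1) (by omega) (by omega) (by omega), hcur']
    · have hlt : start < e := by omega
      have hne := window_ne_nil s start e hlt (by omega)
      have hlast := window_getLastD s start e hlt (by omega)
      by_cases hstep : s.getD e 0 = s.getD (e - 1) 0 + 1
      · -- run continues: A keeps start, go extends the current run
        have hA : ¬ (e > start ∧ s.getD e 0 ≠ s.getD (e - 1) 0 + 1) :=
          fun h => h.2 hstep
        have hG : ((s.drop start).take (e - start)) ≠ [] ∧
            s.getD e 0 = ((s.drop start).take (e - start)).getLastD 0 + 1 :=
          ⟨hne, by rw [hlast]; exact hstep⟩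
        rw [if_neg hA, if_pos hG]
        have hcur' : (s.drop start).take (e - start) ++ [s.getD e 0]
            = (s.drop start).take (e + 1 - start) := window_extend s start e (by omega) he
        have hlen : ((((s.drop start).take (e - start)) ++ [s.getD e 0]).length : Int)
            = (e : Int) - (start : Int) + 1 := by
          simp [window_length s start e (by omega)]; omega
        by_cases hret : (e : Int) - (start : Int) + 1 = count
        · rw [if_pos hret, if_pos (hlen.trans hret)]
          rw [show ((e : Int)) + 1 = (((e + 1 : Nat) : Int)) by push_cast; ring,
            PySem.List.slice_natCast, ← hcur']
        · rw [if_neg hret, if_neg (fun h => hret ((hlen.symm).trans h))]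
          rw [ih start (e + 1) (by omega) (by omega) (by omega), hcur']
      · -- run breaks: A resets start to e, go starts a new run [x]
        have hA : e > start ∧ s.getD e 0 ≠ s.getD (e - 1) 0 + 1 := ⟨hlt, hstep⟩
        have hG : ¬ (((s.drop start).take (e - start)) ≠ [] ∧
            s.getD e 0 = ((s.drop start).take (e - start)).getLastD 0 + 1) := by
          rintro ⟨-, h⟩; exact hstep (by rw [← hlast]; exact h)
        rw [if_pos hA, if_neg hG]
        have hcur' : [s.getD e 0] = (s.drop e).take (e + 1 - e) := by
          have h := window_extend s e e (Nat.le_refl _) he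
          simpa using h
        by_cases hret : (e : Int) - (e : Int) + 1 = count
        · rw [if_pos hret,
            if_pos (show (([s.getD e 0]).length : Int) = count by simpa using hret)]
          rw [show ((e : Int)) + 1 = (((e + 1 : Nat) : Int)) by push_cast; ring,
            PySem.List.slice_natCast, ← hcur']
        · rw [if_neg hret,
            if_neg (show ¬ (([s.getD e 0]).length : Int) = count by simpa using hret)]
          rw [ih e (e + 1) (by omega) (by omega) (by omega), hcur']

lemma splitRuns_acc (l : List Int) :
    ∀ runs cur, splitRuns runs cur l =
      (runs ++ (splitRuns [] cur l).1, (splitRuns [] cur l).2) := by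
  induction l with
  | nil => intro runs cur; simp [splitRuns]
  | cons x t ih =>
    intro runs cur
    simp only [splitRuns]
    by_cases h1 : cur ≠ [] ∧ x = cur.getLastD 0 + 1
    · rw [if_pos h1, if_pos h1, ih runs]
    · rw [if_neg h1, if_neg h1]
      by_cases h2 : cur ≠ []
      · rw [if_pos h2, if_pos h2, ih (runs ++ [cur]), ih ([] ++ [cur])]
        simp
      · rw [if_neg h2, if_neg h2, ih runs]

lemma splitRuns_head (l : List Int) :
    ∀ cur, cur ≠ [] → ∃ ext rs, finishRuns (splitRuns [] cur l) = (cur ++ ext) :: rs := by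
  induction l with
  | nil =>
    intro cur hcur
    exact ⟨[], [], by simp [splitRuns, finishRuns, hcur]⟩
  | cons x t ih =>
    intro cur hcur
    simp only [splitRuns]
    by_cases h1 : cur ≠ [] ∧ x = cur.getLastD 0 + 1
    · rw [if_pos h1]
      obtain ⟨ext, rs, hh⟩ := ih (cur ++ [x]) (by simp)
      exact ⟨x :: ext, rs, by rw [hh]; simp⟩
    · rw [if_neg h1, if_pos hcur, splitRuns_acc]
      refine ⟨[], finishRuns (splitRuns [] [x] t), ?_⟩
      simp only [List.nil_append]
      rw [finishRuns_cons']
      simp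

lemma go_eq_scan (count : Int) (hc : 2 ≤ count) (l : List Int) :
    ∀ cur, (cur.length : Int) < count →
    go count cur l = scanRuns (finishRuns (splitRuns [] cur l)) count := by
  induction l with
  | nil =>
    intro cur hlen
    by_cases hcur : cur ≠ []
    · simp only [go, splitRuns, finishRuns, if_pos hcur, List.nil_append]
      simp only [scanRuns]
      rw [if_neg (by omega)]
    · simp [go, splitRuns, finishRuns, hcur, scanRuns]
  | cons x t ih =>
    intro cur hlen
    simp only [go, splitRuns]
    by_cases h1 : cur ≠ [] ∧ x = cur.getLastD 0 + 1
    · rw [if_pos h1, if_pos h1]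
      have hlen' : ((cur ++ [x]).length : Int) = (cur.length : Int) + 1 := by simp
      by_cases hret : ((cur ++ [x]).length : Int) = count
      · rw [if_pos hret]
        obtain ⟨ext, rs, hh⟩ := splitRuns_head t (cur ++ [x]) (by simp)
        rw [hh]
        simp only [scanRuns]
        rw [if_pos (by simp; omega)]
        rw [show count = (((cur ++ [x]).length : Nat) : Int) from hret.symm,
          PySem.List.slice_to_natCast, List.take_left]
      · rw [if_neg hret, ih (cur ++ [x]) (by omega)]
    · rw [if_neg h1, if_neg h1, if_neg (show ¬ (([x].length : Int) = count) by simp; omega)]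
      by_cases h2 : cur ≠ []
      · rw [if_pos h2, splitRuns_acc]
        simp only [List.nil_append]
        rw [finishRuns_cons']
        simp only [scanRuns]
        rw [if_neg (by omega), ih [x] (by simp; omega)]
      · rw [if_neg h2, ih [x] (by simp; omega)]

-- ===== VERDICT (by name: the statement is the Claim_ definition above) =====
theorem select_contiguous_py_spec : Claim_equal_select_contiguous_py := by
  intro indices count _
  unfold Spec_select_contiguous_py select_contiguous_py select_contiguous_py_alt
  by_cases h : count ≤ 1
  · simp [h]
  · simp only [h, if_false]
    have hc : 2 ≤ count := by omega
    rw [aLoop_eq_go _ count (PySem.List.sorted indices (fun x => x) false).length 0 0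
      (Nat.le_refl 0) (Nat.zero_le _) rfl]
    simpa [finishRuns] using go_eq_scan count hc (PySem.List.sorted indices (fun x => x) false) [] (by simp; omega)
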